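-- pv_equiv track=rewrite | github.com/weniv/pythonalgo100 | src/py/answer.py | solution
-- ===== SOURCE A (Python) =====
-- def solution(schedules):
--     # 모든 일정을 하나의 리스트로 변환하면서 요일 정보를 함께 저장합니다.
--     all_schedules = []
--     for day, dates in schedules.items():
--         for date in dates:
--             # 날짜를 'YYYY-MM-DD'에서 'YY-MM-DD 요일' 형식으로 변환합니다.
--             converted_date = date[2:] + " " + day
--             all_schedules.append(converted_date)
--
--     # 변환된 일정을 내림차순으로 정렬합니다.
--     all_schedules.sort(reverse=True)
--
--     # 최근 3개의 일정을 선택합니다.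
--     return all_schedules[:3]
-- ===== SOURCE B (Python) =====
-- def solution(schedules):
--     # Single pass: keep a descending buffer of at most the 3 largest formatted strings.
--     buf = []
--     for day, dates in schedules.items():
--         for date in dates:
--             s = date[2:] + " " + day
--             i = 0
--             while i < len(buf) and buf[i] >= s:
--                 i += 1
--             buf.insert(i, s)
--             if len(buf) > 3:
--                 buf.pop()
--     return buf
-- ===== Notes on version B (the rewrite author's own statement) =====
-- stated objective: alternative
-- what changed: Instead of collecting every formatted date and sorting the whole list before slicing, B keeps a bounded buffer of at most 3 strings in descending order during a single pass, inserting each new string in place and truncating, so no full sort and no O(n) intermediate list is built.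
import Mathlib
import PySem

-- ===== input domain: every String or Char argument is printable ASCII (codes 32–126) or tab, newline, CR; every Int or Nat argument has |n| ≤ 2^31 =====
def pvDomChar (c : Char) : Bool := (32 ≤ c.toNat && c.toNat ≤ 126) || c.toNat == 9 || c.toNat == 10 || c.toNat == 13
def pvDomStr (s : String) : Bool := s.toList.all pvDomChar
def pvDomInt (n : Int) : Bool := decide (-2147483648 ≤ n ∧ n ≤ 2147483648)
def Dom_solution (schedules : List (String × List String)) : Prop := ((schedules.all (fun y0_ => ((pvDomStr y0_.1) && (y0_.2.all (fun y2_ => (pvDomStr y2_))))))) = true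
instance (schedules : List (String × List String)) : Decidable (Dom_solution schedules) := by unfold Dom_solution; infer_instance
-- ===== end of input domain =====

-- B replaces sort-then-slice by a single pass holding a descending buffer of at most 3 strings (alternative decomposition, same result).

-- ===== PORT A =====
-- date[2:] + " " + day, shared formatting expression of both Pythons
def pvFmt (day date : String) : String := PySem.Str.slice date (some 2) none ++ " " ++ day

def solution (schedules : List (String × List String)) : List String :=
  -- all_schedules built by the nested append loop, then sorted descending, then [:3]
  let all := schedules.foldl (fun acc p => p.2.foldl (fun a date => a ++ [pvFmt p.1 date]) acc) []
  PySem.List.slice (PySem.List.sorted all (fun x => x) true) none (some 3)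

-- ===== PORT B =====
-- insert s after the elements that are ≥ s (the while-loop + list.insert of Source B)
def pvIns (s : String) : List String → List String
  | [] => [s]
  | y :: ys => if s ≤ y then y :: pvIns s ys else s :: y :: ys

def solution_alt (schedules : List (String × List String)) : List String :=
  schedules.foldl (fun buf p =>
    p.2.foldl (fun b date => ((pvIns (pvFmt p.1 date) b).take 3)) buf) []

-- ===== PRECONDITION & SPEC =====
def Spec_solution (schedules : List (String × List String)) (out : List String) : Prop := out = solution_alt schedules
instance (schedules : List (String × List String)) (out : List String) : Decidable (Spec_solution schedules out) := by unfold Spec_solution; infer_instance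

-- ===== CLAIM (what is proved, stated in full; the proofs are below) =====
def Claim_equal_solution : Prop := ∀ (schedules : List (String × List String)), Dom_solution schedules → Spec_solution schedules (solution schedules)

-- ===== LEMMAS AND PROOFS =====

-- Source B's insertion is insertBy with the reverse-sort comparison of sorted(reverse=True)
theorem pvIns_eq_insertBy (s : String) (l : List String) :
    pvIns s l = PySem.List.insertBy (fun a b => decide (b < a)) s l := by
  induction l with
  | nil => rfl
  | cons y ys ih =>
    simp only [pvIns, PySem.List.insertBy, ih]
    by_cases h : s ≤ y
    · rw [if_pos h, if_neg (by simpa using not_lt.mpr h)]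
    · rw [if_neg h, if_pos (by simpa using lt_of_not_ge h)]

-- truncating before or after an insertion gives the same first k elements
theorem take_insertBy {α : Type} (bef : α → α → Bool) (x : α) :
    ∀ (acc : List α) (k : Nat),
      (PySem.List.insertBy bef x acc).take k = (PySem.List.insertBy bef x (acc.take k)).take k := by
  intro acc
  induction acc with
  | nil => intro k; simp
  | cons a t ih =>
    intro k
    cases k with
    | zero => simp
    | succ m =>
      by_cases h : bef x a = true
      · simp only [PySem.List.insertBy, h, if_true, List.take_succ_cons]
        cases m with
        | zero => simp
        | succ m' => simp [List.take_take]
      · simp [PySem.List.insertBy, h, List.take_succ_cons, ih m]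

-- the top-3 of the insertion fold can be maintained as a 3-bounded buffer
theorem foldl_insert_take {α : Type} (bef : α → α → Bool) :
    ∀ (xs : List α) (acc : List α),
      (xs.foldl (fun a x => PySem.List.insertBy bef x a) acc).take 3
        = xs.foldl (fun b x => (PySem.List.insertBy bef x b).take 3) (acc.take 3) := by
  intro xs
  induction xs with
  | nil => intro acc; rfl
  | cons x t ih =>
    intro acc
    simp only [List.foldl_cons, ih, take_insertBy bef x acc 3]

theorem solution_spec : Claim_equal_solution := by
  intro schedules _
  unfold Spec_solution solution solution_alt
  dsimp only
  have hall : List.foldl (fun acc p => List.foldl (fun a date => a ++ [pvFmt p.1 date]) acc p.2)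
      ([] : List String) schedules = schedules.flatMap (fun p => p.2.map (pvFmt p.1)) := by
    rw [PySem.List.foldl_congr_mem
        (l := schedules) (init := ([] : List String))
        (f := fun acc p => List.foldl (fun a date => a ++ [pvFmt p.1 date]) acc p.2)
        (g := fun acc p => acc ++ p.2.map (pvFmt p.1))
        (fun acc p _ => PySem.List.foldl_append_singleton_eq_map ..),
      PySem.List.foldl_append_eq_flatMap, List.nil_append]
  rw [hall, PySem.List.slice_to _ (by norm_num),
    PySem.List.sorted_rev_eq_foldl_insertBy,
    show Int.toNat 3 = 3 from rfl,
    foldl_insert_take]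
  simp only [List.take_nil, List.flatMap_def, List.foldl_flatten, List.foldl_map]
  refine PySem.List.foldl_congr_mem _ _ _ _ ?_
  intro b p _
  exact PySem.List.foldl_congr_mem _ _ _ _ (fun b' d _ => by rw [pvIns_eq_insertBy])
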